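-- pv_equiv track=rewrite | github.com/SnickeyX/aoc_22 | day_15/beacon.py | add_points_within_manhattan
-- ===== SOURCE A (Python) =====
-- def get_manhattan_dist(p,q):
--     return abs(p[0]-q[0]) + abs(p[1]-q[1])
--
-- def add_points_within_manhattan(p : tuple, q : tuple, points : set, y_coord : int, chall_num : int = 1):
--     man_dist = get_manhattan_dist(p,q)
--     if(p[1] == y_coord):
--         points.add(p)
--     for i in range(p[0] - man_dist, p[0] + man_dist + 1):
--             if(get_manhattan_dist(p,(i,y_coord)) <= man_dist and (i, y_coord) != q):
--                 points.add((i,y_coord))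
--     return points
-- ===== SOURCE B (Python) =====
-- def add_points_within_manhattan(p, q, points, y_coord, chall_num=1):
--     # Note: like A, this mutates `points` in place and returns it.
--     # Half-width of the covered band on row y_coord (empty when negative).
--     r = abs(p[0] - q[0]) + abs(p[1] - q[1]) - abs(p[1] - y_coord)
--     if p[1] == y_coord:
--         points.add(p)
--     points.update((i, y_coord) for i in range(p[0] - r, p[0] + r + 1)
--                   if (i, y_coord) != q)
--     return points
-- ===== Notes on version B (the rewrite author's own statement) =====
-- stated objective: alternative
-- what changed: B computes the covered band half-width r = man_dist - |p[1]-y_coord| in closed form and performs one bulk set.update over a filtered comprehension of just that band, instead of A's element-by-element loop over the full 2*man_dist+1 range with a per-point Manhattan-distance test and individual add calls.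
-- outside the precondition, e.g. on add_points_within_manhattan((2, 7, 1), (2, 7), set(), 7, 1): A returns {(2, 7, 1)}, B returns {(2, 7, 1)}
import Mathlib
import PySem

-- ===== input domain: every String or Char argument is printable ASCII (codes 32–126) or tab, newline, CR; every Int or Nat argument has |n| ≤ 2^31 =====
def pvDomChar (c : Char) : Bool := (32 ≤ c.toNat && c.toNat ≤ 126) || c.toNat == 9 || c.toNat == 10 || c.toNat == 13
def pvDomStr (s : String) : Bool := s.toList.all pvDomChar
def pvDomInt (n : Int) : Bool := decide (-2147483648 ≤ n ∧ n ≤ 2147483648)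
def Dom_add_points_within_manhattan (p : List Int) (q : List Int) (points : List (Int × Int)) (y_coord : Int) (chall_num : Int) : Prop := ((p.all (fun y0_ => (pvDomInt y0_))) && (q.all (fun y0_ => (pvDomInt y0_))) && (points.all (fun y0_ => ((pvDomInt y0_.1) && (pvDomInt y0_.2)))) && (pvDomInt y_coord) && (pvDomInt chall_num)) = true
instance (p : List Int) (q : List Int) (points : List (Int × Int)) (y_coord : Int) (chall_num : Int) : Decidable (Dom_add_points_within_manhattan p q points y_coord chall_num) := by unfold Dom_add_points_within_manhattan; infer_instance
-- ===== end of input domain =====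

-- B computes the covered band half-width r in closed form and does one bulk set.update over a
-- filtered comprehension of just that band, instead of A's per-point distance-tested add loop over
-- the full range (objective: alternative; both, like the Pythons, mutate/extend the `points` set
-- and return it — the claim is about the returned value).

-- ===== PORT A =====
-- helper get_manhattan_dist (indices guarded by Pre_, both arguments have length ≥ 2 there)
def get_manhattan_dist (p q : List Int) : Int :=
  |p.getD 0 0 - q.getD 0 0| + |p.getD 1 0 - q.getD 1 0|

def add_points_within_manhattan (p : List Int) (q : List Int) (points : List (Int × Int)) (y_coord : Int) (chall_num : Int) : List (Int × Int) :=
  let man_dist := get_manhattan_dist p q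
  let points := if p.getD 1 0 = y_coord then PySem.Set.add points (p.getD 0 0, p.getD 1 0) else points
  (PySem.List.pyRange (p.getD 0 0 - man_dist) (p.getD 0 0 + man_dist + 1) 1).foldl
    (fun pts i =>
      if get_manhattan_dist p [i, y_coord] ≤ man_dist ∧ [i, y_coord] ≠ q then
        PySem.Set.add pts (i, y_coord)
      else pts)
    points

-- ===== PORT B =====
def add_points_within_manhattan_alt (p : List Int) (q : List Int) (points : List (Int × Int)) (y_coord : Int) (chall_num : Int) : List (Int × Int) :=
  let r := |p.getD 0 0 - q.getD 0 0| + |p.getD 1 0 - q.getD 1 0| - |p.getD 1 0 - y_coord|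
  let points := if p.getD 1 0 = y_coord then PySem.Set.add points (p.getD 0 0, p.getD 1 0) else points
  PySem.Set.update points
    (((PySem.List.pyRange (p.getD 0 0 - r) (p.getD 0 0 + r + 1) 1).filter
        (fun i => decide ([i, y_coord] ≠ q))).map (fun i => (i, y_coord)))

-- ===== PRECONDITION & SPEC =====
-- Pre_ excludes p or q with fewer than 2 entries (Python raises IndexError in get_manhattan_dist),
-- and p with more than 2 entries when p[1] == y_coord (there A returns a set containing the tuple p,
-- which is not a value of the declared pair type List (Int × Int)).
def Pre_add_points_within_manhattan (p : List Int) (q : List Int) (points : List (Int × Int)) (y_coord : Int) (chall_num : Int) : Prop :=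
  2 ≤ p.length ∧ 2 ≤ q.length ∧ (p.getD 1 0 = y_coord → p.length = 2)
instance (p : List Int) (q : List Int) (points : List (Int × Int)) (y_coord : Int) (chall_num : Int) : Decidable (Pre_add_points_within_manhattan p q points y_coord chall_num) := by unfold Pre_add_points_within_manhattan; infer_instance

def pvWitness_add_points_within_manhattan : List Int × List Int × (List (Int × Int)) × Int × Int :=
  ([2, 3], [4, 1], [(0, 0)], 3, 1)

def Spec_add_points_within_manhattan (p : List Int) (q : List Int) (points : List (Int × Int)) (y_coord : Int) (chall_num : Int) (out : List (Int × Int)) : Prop := out = add_points_within_manhattan_alt p q points y_coord chall_num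
instance (p : List Int) (q : List Int) (points : List (Int × Int)) (y_coord : Int) (chall_num : Int) (out : List (Int × Int)) : Decidable (Spec_add_points_within_manhattan p q points y_coord chall_num out) := by unfold Spec_add_points_within_manhattan; infer_instance

-- ===== CLAIM (what is proved, stated in full; the proofs are below) =====
def Claim_equal_add_points_within_manhattan : Prop := ∀ (p : List Int) (q : List Int) (points : List (Int × Int)) (y_coord : Int) (chall_num : Int), Dom_add_points_within_manhattan p q points y_coord chall_num → Pre_add_points_within_manhattan p q points y_coord chall_num → Spec_add_points_within_manhattan p q points y_coord chall_num (add_points_within_manhattan p q points y_coord chall_num)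

-- ===== LEMMAS AND PROOFS =====

-- a fold whose condition never fires leaves the accumulator unchanged
theorem pv_foldl_skip {α : Type} (c : Int → Prop) [DecidablePred c] (g : α → Int → α)
    (l : List Int) (acc : α) (h : ∀ i ∈ l, ¬ c i) :
    l.foldl (fun pts i => if c i then g pts i else pts) acc = acc := by
  induction l generalizing acc with
  | nil => rfl
  | cons a t ih =>
    simp only [List.foldl_cons, if_neg (h a (List.mem_cons_self))]
    exact ih acc (fun i hi => h i (List.mem_cons_of_mem a hi))

-- on a list where c₁ always holds, testing c₁ ∧ c₂ is the same as testing c₂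
theorem pv_foldl_and_true {α : Type} (c₁ c₂ : Int → Prop) [DecidablePred c₁] [DecidablePred c₂]
    (g : α → Int → α) (l : List Int) (acc : α) (h : ∀ i ∈ l, c₁ i) :
    l.foldl (fun pts i => if c₁ i ∧ c₂ i then g pts i else pts) acc
      = l.foldl (fun pts i => if c₂ i then g pts i else pts) acc := by
  induction l generalizing acc with
  | nil => rfl
  | cons a t ih =>
    have h1 : c₁ a := h a (List.mem_cons_self)
    simp only [List.foldl_cons]
    rw [show (if c₁ a ∧ c₂ a then g acc a else acc) = (if c₂ a then g acc a else acc) by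
      by_cases h2 : c₂ a <;> simp [h1, h2]]
    exact ih _ (fun i hi => h i (List.mem_cons_of_mem a hi))

-- folding g over a filtered list is a conditional fold over the whole list
theorem pv_foldl_over_filter {α : Type} (c : Int → Bool) (g : α → Int → α)
    (l : List Int) (acc : α) :
    (l.filter c).foldl g acc = l.foldl (fun pts i => if c i then g pts i else pts) acc := by
  induction l generalizing acc with
  | nil => rfl
  | cons a t ih =>
    by_cases h : c a <;> simp [List.filter_cons, h, ih]

-- ===== VERDICT (by name: the statement is the Claim_ definition above) =====

theorem add_points_within_manhattan_spec : Claim_equal_add_points_within_manhattan := by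
  intro p q points y_coord chall_num _ _
  unfold Spec_add_points_within_manhattan
  unfold add_points_within_manhattan add_points_within_manhattan_alt get_manhattan_dist
  simp only [List.getD_cons_zero, List.getD_cons_succ]
  set p0 := p.getD 0 0 with hp0
  set p1 := p.getD 1 0 with hp1
  set man := |p0 - q.getD 0 0| + |p1 - q.getD 1 0| with hman
  set dy := |p1 - y_coord| with hdy
  set pts0 := (if p1 = y_coord then PySem.Set.add points (p0, p1) else points) with hpts0
  -- B's bulk update is a fold of adds over the filtered band
  rw [PySem.Set.update_map_eq_foldl_add, pv_foldl_over_filter]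
  by_cases hr : man - dy < 0
  · -- band empty: A's condition never holds, B's range is empty
    rw [pv_foldl_skip (fun i => |p0 - i| + |p1 - y_coord| ≤ man ∧ [i, y_coord] ≠ q)
        (fun pts i => PySem.Set.add pts (i, y_coord)) _ pts0
        (by intro i _ h; have := h.1; have : |p0 - i| ≥ 0 := abs_nonneg _; omega)]
    rw [PySem.List.pyRange_one_eq_nil (by omega)]
    rfl
  · push_neg at hr
    set r := man - dy with hrdef
    have h0 : 0 ≤ dy := abs_nonneg _
    -- split A's range into left / band / right
    rw [PySem.List.pyRange_one_append (p0 - man) (p0 - r) (p0 + man + 1) (by omega) (by omega),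
        PySem.List.pyRange_one_append (p0 - r) (p0 + r + 1) (p0 + man + 1) (by omega) (by omega),
        List.foldl_append, List.foldl_append]
    -- left part: |p0 - i| > r, the distance test fails
    rw [pv_foldl_skip (fun i => |p0 - i| + |p1 - y_coord| ≤ man ∧ [i, y_coord] ≠ q)
        (fun pts i => PySem.Set.add pts (i, y_coord)) _ pts0
        (by intro i hi h
            rw [PySem.List.mem_pyRange_one] at hi
            have := h.1
            have : |p0 - i| = p0 - i := abs_of_nonneg (by omega)
            omega)]
    -- right part: |p0 - i| > r, the distance test fails
    rw [pv_foldl_skip (fun i => |p0 - i| + |p1 - y_coord| ≤ man ∧ [i, y_coord] ≠ q)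
        (fun pts i => PySem.Set.add pts (i, y_coord)) _ _
        (by intro i hi h
            rw [PySem.List.mem_pyRange_one] at hi
            have := h.1
            have : |p0 - i| = -(p0 - i) := abs_of_nonpos (by omega)
            omega)]
    -- band: the distance test always holds; both folds take the same steps
    rw [pv_foldl_and_true (fun i => |p0 - i| + |p1 - y_coord| ≤ man) (fun i => [i, y_coord] ≠ q)
      (fun pts i => PySem.Set.add pts (i, y_coord)) _ pts0
      (by intro i hi
          rw [PySem.List.mem_pyRange_one] at hi
          have h1 : |p0 - i| ≤ r := abs_le.mpr (by omega)
          omega)]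
    congr 1
    funext pts i
    by_cases hq : [i, y_coord] = q <;> simp [hq]
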